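-- pv_equiv track=rewrite | github.com/pypi-data/pypi-mirror-296 | packages/pycurses/pycurses-0.0.37-py2.py3-none-any.whl/pycurses/lines.py | split_into_even_chunks
-- ===== SOURCE A (Python) =====
-- def space_elements(list1, list2):
--     result = []
--     interval = len(list2) // (len(list1) + 1)
--     if len(list2) == len(list1):
--         for i in range(len(list1) + len(list2)):
--             if i % 2:
--                 result.append(list1.pop(0))
--             else:
--                 result.append(list2.pop(0))
--         return result
--
--     for i, el in enumerate(list2):
--         result.append(el)
--         if i % interval == interval - 1 and list1:
--             result.append(list1.pop(0))
--     return result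
--
-- def split_into_even_chunks(chunks, amount):
--     if chunks == 0:
--         return [amount]
--     output = [0 for i in range(chunks)]
--     for i in range(amount):
--         output[i % len(output)] += 1
--
--     base = output[0]
--     split_ind = 0
--
--     if set(output) == {base}:
--         return output
--
--     while output[split_ind] == base:
--         split_ind += 1
--
--     larger_numbers = output[:split_ind]
--     smaller_numbers = output[split_ind:]
--
--     if len(larger_numbers) > len(smaller_numbers):
--         elements = space_elements(smaller_numbers, larger_numbers)
--         assert sum(elements) == amount
--         return elements
--     else:
--         elements = space_elements(larger_numbers, smaller_numbers)
--         assert sum(elements) == amount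
--         return elements
-- ===== SOURCE B (Python) =====
-- def split_into_even_chunks(chunks, amount):
--     if chunks == 0:
--         return [amount]
--     # O(chunks): bin i receives len(range(i, amount, chunks)) units (closed form, no O(amount) loop)
--     bins = [len(range(i, amount, chunks)) for i in range(chunks)]
--     big, small = bins[0], bins[-1]
--     if big == small:
--         return bins
--     r = bins.count(big)
--     if r > chunks - r:
--         n1, v1, n2, v2 = chunks - r, small, r, big
--     else:
--         n1, v1, n2, v2 = r, big, chunks - r, small
--     interval = max(1, n2 // (n1 + 1))
--     return ([v2] * interval + [v1]) * n1 + [v2] * (n2 - n1 * interval)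
-- ===== Notes on version B (the rewrite author's own statement) =====
-- stated objective: faster
-- what changed: B computes each bin's count in closed form as len(range(i, amount, chunks)) (O(chunks) instead of A's O(amount) increment loop) and builds the interleaved output directly by list repetition ([v2]*interval+[v1])*n1+[v2]*rest instead of simulating space_elements' enumerate/pop loop.
import Mathlib
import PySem

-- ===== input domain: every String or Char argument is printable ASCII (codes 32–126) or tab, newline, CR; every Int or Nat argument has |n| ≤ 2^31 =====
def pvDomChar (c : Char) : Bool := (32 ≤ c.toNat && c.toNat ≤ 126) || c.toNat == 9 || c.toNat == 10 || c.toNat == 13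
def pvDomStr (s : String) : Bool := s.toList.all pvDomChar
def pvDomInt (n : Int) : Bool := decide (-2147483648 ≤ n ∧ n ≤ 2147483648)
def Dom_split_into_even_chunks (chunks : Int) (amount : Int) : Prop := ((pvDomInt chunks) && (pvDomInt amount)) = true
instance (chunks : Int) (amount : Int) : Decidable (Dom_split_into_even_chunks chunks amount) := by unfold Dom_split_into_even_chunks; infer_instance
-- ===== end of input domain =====

-- B replaces A's O(amount) counting loop by a closed-form O(chunks) bin computation
-- (bin i gets len(range(i, amount, chunks)) units) and builds the interleaved pattern
-- directly by list repetition instead of simulating space_elements' pop loop.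


-- ===== PORT A =====
-- output[i % len(output)] += 1  (len(output) = 0, i.e. chunks < 0, raises in Python: outside Pre_)
def pvBump (out : List Int) (i : Int) : List Int :=
  let j := (PySem.Int.mod i ((out.length : Nat) : Int)).toNat
  out.set j (out.getD j 0 + 1)

-- while output[split_ind] == base: split_ind += 1  (walks from the front; running past the
-- end would be Python's IndexError, unreachable: the while is entered only when some element differs)
def pvFindSplit : List Int → Int → Nat
  | [], _ => 0
  | x :: xs, b => if x == b then pvFindSplit xs b + 1 else 0

-- space_elements(list1, list2); list.pop(0) is headD/tail (pop of [] raises in Python,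
-- unreachable here: guarded by the branch condition / the equal lengths)
def pvSpaceElements (list1 list2 : List Int) : List Int :=
  let interval : Nat := list2.length / (list1.length + 1)
  if list2.length = list1.length then
    ((List.range (list1.length + list2.length)).foldl
      (fun (st : List Int × List Int × List Int) i =>
        if i % 2 = 1 then (st.1 ++ [st.2.1.headD 0], st.2.1.tail, st.2.2)
        else (st.1 ++ [st.2.2.headD 0], st.2.1, st.2.2.tail))
      ([], list1, list2)).1
  else
    ((PySem.List.enumerate list2 0).foldl
      (fun (st : List Int × List Int) p =>
        let res := st.1 ++ [p.2]
        if PySem.Int.mod p.1 ((interval : Nat) : Int) = ((interval : Nat) : Int) - 1 ∧ st.2 ≠ [] then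
          (res ++ [st.2.headD 0], st.2.tail)
        else (res, st.2))
      ([], list1)).1

-- the asserts 'sum(elements) == amount' always hold on the reachable inputs and are omitted
def split_into_even_chunks (chunks : Int) (amount : Int) : List Int :=
  if chunks = 0 then [amount]
  else
    let output := (PySem.List.pyRange 0 amount 1).foldl pvBump
      ((PySem.List.pyRange 0 chunks 1).map (fun _ => (0 : Int)))
    let base := output.getD 0 0   -- output[0] (empty output, i.e. chunks < 0, raises: outside Pre_)
    -- set(output) == {base}
    if PySem.Set.equal (PySem.Set.ofList output) (PySem.Set.ofList [base]) then output
    else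
      let split_ind := pvFindSplit output base
      let larger := output.take split_ind    -- output[:split_ind]
      let smaller := output.drop split_ind   -- output[split_ind:]
      if larger.length > smaller.length then pvSpaceElements smaller larger
      else pvSpaceElements larger smaller

-- ===== PORT B =====
def split_into_even_chunks_alt (chunks : Int) (amount : Int) : List Int :=
  if chunks = 0 then [amount]
  else
    -- bins = [len(range(i, amount, chunks)) for i in range(chunks)]
    let bins := (PySem.List.pyRange 0 chunks 1).map
      (fun i => ((PySem.List.pyRange i amount chunks).length : Int))
    let big := bins.getD 0 0                       -- bins[0]  (chunks < 0 raises: outside Pre_)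
    let small := PySem.List.pyGetD bins (-1) 0     -- bins[-1]
    if big = small then bins
    else
      let r := bins.count big
      let p : Nat × Int × Nat × Int :=
        if (r : Int) > (bins.length : Int) - (r : Int) then (bins.length - r, small, r, big)
        else (r, big, bins.length - r, small)
      let interval := max 1 (p.2.2.1 / (p.1 + 1))
      -- ([v2] * interval + [v1]) * n1 + [v2] * (n2 - n1 * interval)
      (List.replicate p.1 (List.replicate interval p.2.2.2 ++ [p.2.1])).flatten
        ++ List.replicate (p.2.2.1 - p.1 * interval) p.2.2.2

-- ===== PRECONDITION & SPEC =====
-- A raises on every chunks < 0 (ZeroDivisionError 'i % 0' when amount > 0, IndexError 'output[0]'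
-- otherwise); Pre_ excludes exactly those inputs.
def Pre_split_into_even_chunks (chunks : Int) (_amount : Int) : Prop := 0 ≤ chunks
instance (chunks : Int) (amount : Int) : Decidable (Pre_split_into_even_chunks chunks amount) := by
  unfold Pre_split_into_even_chunks; infer_instance
def pvWitness_split_into_even_chunks : Int × Int := (5, 7)

def Spec_split_into_even_chunks (chunks : Int) (amount : Int) (out : List Int) : Prop := out = split_into_even_chunks_alt chunks amount
instance (chunks : Int) (amount : Int) (out : List Int) : Decidable (Spec_split_into_even_chunks chunks amount out) := by unfold Spec_split_into_even_chunks; infer_instance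

-- ===== CLAIM (what is proved, stated in full; the proofs are below) =====
def Claim_equal_split_into_even_chunks : Prop := ∀ (chunks : Int) (amount : Int), Dom_split_into_even_chunks chunks amount → Pre_split_into_even_chunks chunks amount → Spec_split_into_even_chunks chunks amount (split_into_even_chunks chunks amount)

-- ===== LEMMAS AND PROOFS =====

def pvCanon (c Q R : Nat) : List Int :=
  List.replicate R ((Q : Int) + 1) ++ List.replicate (c - R) (Q : Int)

lemma pvCanon_length (c Q R : Nat) (hR : R ≤ c) : (pvCanon c Q R).length = c := by
  simp [pvCanon]; omega

lemma pvBump_mid (pre suf : List Int) (x : Int) (i : Int)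
    (h : (PySem.Int.mod i (((pre ++ x :: suf).length : Nat) : Int)).toNat = pre.length) :
    pvBump (pre ++ x :: suf) i = pre ++ (x + 1) :: suf := by
  unfold pvBump
  simp only [h]
  have hg : (pre ++ x :: suf).getD pre.length 0 = x := by
    simp [List.getD_eq_getElem?_getD]
  rw [hg, List.set_append]
  simp

lemma pvBump_canon (c : Nat) (hc : 0 < c) (k : Nat) :
    pvBump (pvCanon c (k / c) (k % c)) (k : Int) = pvCanon c ((k + 1) / c) ((k + 1) % c) := by
  have hj : k % c < c := Nat.mod_lt _ hc
  have hdm := Nat.div_add_mod k c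
  have hsplit : pvCanon c (k / c) (k % c) =
      List.replicate (k % c) ((k / c : Nat) + 1 : Int) ++ ((k / c : Nat) : Int) :: List.replicate (c - k % c - 1) ((k / c : Nat) : Int) := by
    unfold pvCanon
    rw [show c - k % c = (c - k % c - 1) + 1 by omega]
    simp [List.replicate_succ]
  rw [hsplit, pvBump_mid]
  · by_cases hlast : k % c + 1 = c
    · have hmul : c * (k / c + 1) = c * (k / c) + c := by ring
      have hk1 : k + 1 = c * (k / c + 1) := by omega
      have h1 : (k + 1) % c = 0 := by rw [hk1]; exact Nat.mul_mod_right _ _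
      have h2 : (k + 1) / c = k / c + 1 := by rw [hk1]; exact Nat.mul_div_cancel_left _ hc
      rw [h1, h2]
      unfold pvCanon
      have hz : c - k % c - 1 = 0 := by omega
      rw [hz]
      simp only [List.replicate_zero, Nat.sub_zero]
      rw [show ((k / c : Nat) : Int) + 1 = (((k / c + 1 : Nat)) : Int) by push_cast; ring,
        ← List.replicate_succ' (n := k % c)]
      simp [hlast]
    · have hk1 : k + 1 = c * (k / c) + (k % c + 1) := by omega
      have h1 : (k + 1) % c = k % c + 1 := by
        rw [hk1, Nat.mul_add_mod]; exact Nat.mod_eq_of_lt (by omega)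
      have h2 : (k + 1) / c = k / c := by
        rw [hk1, Nat.mul_comm, Nat.add_comm, Nat.add_mul_div_right _ _ hc,
          Nat.div_eq_of_lt (by omega), Nat.zero_add]
      rw [h1, h2]
      unfold pvCanon
      simp only [List.replicate_succ', List.append_assoc, List.singleton_append, Nat.sub_sub]
  · have hlen : (List.replicate (k % c) ((k / c : Nat) + 1 : Int) ++ ((k / c : Nat) : Int) :: List.replicate (c - k % c - 1) ((k / c : Nat) : Int)).length = c := by
      simp; omega
    rw [hlen, PySem.Int.mod_natCast, Int.toNat_natCast]
    simp

lemma pvCountLoop (c : Nat) (hc : 0 < c) (k : Nat) :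
    (PySem.List.pyRange 0 (k : Int) 1).foldl pvBump (List.replicate c (0 : Int)) =
      pvCanon c (k / c) (k % c) := by
  induction k with
  | zero =>
    rw [PySem.List.pyRange_one_eq_nil (by omega)]
    simp [pvCanon, Nat.zero_div, Nat.zero_mod]
  | succ k ih =>
    rw [show ((k + 1 : Nat) : Int) = (k : Int) + 1 by push_cast; ring,
      PySem.List.pyRange_one_succ_right (by omega), List.foldl_append, ih]
    simp only [List.foldl_cons, List.foldl_nil]
    exact pvBump_canon c hc k

lemma pvOutput_eq (c : Nat) (hc : 0 < c) (amount : Int) :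
    (PySem.List.pyRange 0 amount 1).foldl pvBump
        ((PySem.List.pyRange 0 (c : Int) 1).map (fun _ => (0 : Int))) =
      pvCanon c (amount.toNat / c) (amount.toNat % c) := by
  have hinit : (PySem.List.pyRange 0 (c : Int) 1).map (fun _ => (0 : Int)) = List.replicate c (0 : Int) := by
    rw [List.map_const']
    rw [PySem.List.length_pyRange_one]
    norm_num
  rw [hinit]
  rcases le_or_gt amount 0 with h | h
  · rw [PySem.List.pyRange_one_eq_nil (by omega)]
    rw [show amount.toNat = 0 by omega]
    simp [pvCanon, List.foldl_nil]
  · rw [show amount = ((amount.toNat : Nat) : Int) by omega]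
    exact pvCountLoop c hc amount.toNat

lemma pvBinLen (c i : Nat) (hc : 0 < c) (amount : Int) (hi : i < c) :
    (PySem.List.pyRange (i : Int) amount (c : Int)).length =
      if i < amount.toNat % c then amount.toNat / c + 1 else amount.toNat / c := by
  rw [PySem.List.pyRange_of_pos _ _ (by exact_mod_cast hc), List.length_map, List.length_range]
  rcases le_or_gt amount 0 with hneg | hpos
  · rw [if_neg (by omega), show amount.toNat = 0 by omega]
    simp [Nat.zero_div, Nat.zero_mod]
  · have ha : amount = (amount.toNat : Int) := by omega
    set a := amount.toNat with hadef
    obtain ⟨Q, hQ⟩ : ∃ Q, a / c = Q := ⟨_, rfl⟩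
    obtain ⟨R, hR⟩ : ∃ R, a % c = R := ⟨_, rfl⟩
    have hdm : c * Q + R = a := by rw [← hQ, ← hR]; exact Nat.div_add_mod a c
    have hRlt : R < c := hR ▸ Nat.mod_lt _ hc
    rw [hQ, hR]
    by_cases hia : (i : Int) < amount
    · rw [if_pos hia]
      by_cases hiR : i < R
      · rw [if_pos hiR]
        have he : amount - i + c - 1 = ((R - i - 1 : Nat) : Int) + ((Q + 1 : Nat) : Int) * c := by
          push_cast [ha]; ring_nf; omega
        rw [he, Int.add_mul_ediv_right _ _ (by omega : (c : Int) ≠ 0),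
          Int.ediv_eq_zero_of_lt (by positivity) (by omega)]
        omega
      · rw [if_neg hiR]
        have he : amount - i + c - 1 = ((R + c - 1 - i : Nat) : Int) + ((Q : Nat) : Int) * c := by
          push_cast [ha]; ring_nf; omega
        rw [he, Int.add_mul_ediv_right _ _ (by omega : (c : Int) ≠ 0),
          Int.ediv_eq_zero_of_lt (by positivity) (by omega)]
        omega
    · rw [if_neg hia]
      have hac : a < c := by omega
      rw [if_neg (by omega), show Q = 0 by rw [← hQ]; exact Nat.div_eq_of_lt hac]

lemma pvCanon_getElem (c Q R i : Nat) (_hR : R ≤ c) (hi : i < (pvCanon c Q R).length) :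
    (pvCanon c Q R)[i] = if i < R then ((Q : Int) + 1) else (Q : Int) := by
  unfold pvCanon at *
  by_cases h : i < R
  · rw [if_pos h, List.getElem_append_left (by simpa using h)]
    simp
  · rw [if_neg h, List.getElem_append_right (by simpa using h)]
    simp

lemma pvBins_eq (c : Nat) (hc : 0 < c) (amount : Int) :
    (PySem.List.pyRange 0 (c : Int) 1).map
        (fun i => ((PySem.List.pyRange i amount (c : Int)).length : Int)) =
      pvCanon c (amount.toNat / c) (amount.toNat % c) := by
  have hRle : amount.toNat % c ≤ c := le_of_lt (Nat.mod_lt _ hc)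
  apply List.ext_getElem
  · simp [PySem.List.length_pyRange_one, pvCanon]
    omega
  · intro i h1 h2
    have hic : i < c := by
      simpa [PySem.List.length_pyRange_one] using h1
    rw [List.getElem_map, PySem.List.getElem_pyRange_one, pvCanon_getElem _ _ _ _ hRle h2]
    rw [show (0 : Int) + (i : Nat) = (i : Int) by ring, pvBinLen c i hc amount hic]
    split_ifs <;> push_cast <;> ring

lemma pvSetEq_all (c Q : Nat) (hc : 0 < c) :
    PySem.Set.equal (PySem.Set.ofList (pvCanon c Q 0)) (PySem.Set.ofList [(Q : Int)]) = true := by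
  rw [PySem.Set.equal_iff]
  intro x
  simp only [PySem.Set.mem_ofList, pvCanon, List.replicate_zero, List.nil_append,
    List.mem_replicate, List.mem_singleton]
  omega

lemma pvSetEq_mixed (c Q R : Nat) (_hR0 : 0 < R) (hRc : R < c) :
    PySem.Set.equal (PySem.Set.ofList (pvCanon c Q R)) (PySem.Set.ofList [(Q : Int) + 1]) = false := by
  rw [Bool.eq_false_iff]
  intro hcontra
  rw [PySem.Set.equal_iff] at hcontra
  have := (hcontra (Q : Int)).1
  simp only [PySem.Set.mem_ofList, pvCanon, List.mem_append, List.mem_replicate,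
    List.mem_singleton] at this
  have h2 := this (Or.inr ⟨by omega, trivial⟩)
  omega

lemma pvFindSplit_app (R s : Nat) (x y : Int) (hxy : y ≠ x) (hs : 0 < s) :
    pvFindSplit (List.replicate R x ++ List.replicate s y) x = R := by
  induction R with
  | zero =>
    obtain ⟨s', rfl⟩ : ∃ s', s = s' + 1 := ⟨s - 1, by omega⟩
    simp only [List.replicate_zero, List.nil_append, List.replicate_succ, pvFindSplit]
    rw [if_neg (by simpa using hxy)]
  | succ R ih =>
    rw [List.replicate_succ, List.cons_append]
    show (if (x == x) = true then pvFindSplit (List.replicate R x ++ List.replicate s y) x + 1 else 0) = R + 1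
    rw [if_pos (beq_self_eq_true x), ih]

lemma pvSpaceEqLoop (n : Nat) (v1 v2 : Int) (k : Nat) (hk : k ≤ n) :
    (List.range (2 * k)).foldl
      (fun (st : List Int × List Int × List Int) i =>
        if i % 2 = 1 then (st.1 ++ [st.2.1.headD 0], st.2.1.tail, st.2.2)
        else (st.1 ++ [st.2.2.headD 0], st.2.1, st.2.2.tail))
      ([], List.replicate n v1, List.replicate n v2) =
      ((List.replicate k [v2, v1]).flatten, List.replicate (n - k) v1, List.replicate (n - k) v2) := by
  induction k with
  | zero => simp
  | succ k ih =>
    rw [show 2 * (k + 1) = (2 * k + 1) + 1 by ring, List.range_succ, List.range_succ,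
      List.foldl_append, List.foldl_append, ih (by omega)]
    simp only [List.foldl_cons, List.foldl_nil]
    rw [if_pos (by omega), if_neg (by omega)]
    rw [show n - k = (n - k - 1) + 1 by omega, List.replicate_succ (a := v1),
      List.replicate_succ (a := v2)]
    simp only [List.headD_cons, List.tail_cons, Prod.mk.injEq]
    refine ⟨?_, rfl, rfl⟩
    rw [List.replicate_succ' (n := k)]
    simp [List.flatten_append]

lemma pvSpaceEq (n : Nat) (v1 v2 : Int) :
    pvSpaceElements (List.replicate n v1) (List.replicate n v2) =
      (List.replicate n [v2, v1]).flatten := by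
  unfold pvSpaceElements
  rw [if_pos (by simp)]
  rw [show (List.replicate n v1).length + (List.replicate n v2).length = 2 * n by simp; ring]
  rw [pvSpaceEqLoop n v1 v2 n le_rfl]

lemma pvEnumRepl (m : Nat) (v : Int) : ∀ s : Int,
    PySem.List.enumerate (List.replicate m v) s = (List.range m).map (fun j : Nat => (((s + (j : Int)) : Int), v)) := by
  induction m with
  | zero => intro s; simp
  | succ m ih =>
    intro s
    rw [List.replicate_succ, PySem.List.enumerate_cons, ih (s + 1), List.range_succ_eq_map,
      List.map_cons, List.map_map]
    refine congrArg₂ List.cons (by simp) ?_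
    apply List.map_congr_left
    intro j hj
    simp only [Function.comp_apply, Prod.mk.injEq, and_true]
    push_cast
    ring

lemma pvSpaceNeLoop (I n1 : Nat) (v1 v2 : Int) (hI : 0 < I) (i : Nat) :
    (List.range i).foldl
      (fun (st : List Int × List Int) (j : Nat) =>
        if PySem.Int.mod (j : Int) (I : Int) = (I : Int) - 1 ∧ st.2 ≠ [] then
          (st.1 ++ [v2] ++ [st.2.headD 0], st.2.tail)
        else (st.1 ++ [v2], st.2))
      ([], List.replicate n1 v1) =
      ((List.replicate (min n1 (i / I)) (List.replicate I v2 ++ [v1])).flatten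
          ++ List.replicate (i - min n1 (i / I) * I) v2,
        List.replicate (n1 - min n1 (i / I)) v1) := by
  induction i with
  | zero => simp
  | succ i ih =>
    rw [List.range_succ, List.foldl_append, ih]
    simp only [List.foldl_cons, List.foldl_nil]
    obtain ⟨q, hq⟩ : ∃ q, i / I = q := ⟨_, rfl⟩
    obtain ⟨ρ, hρ⟩ : ∃ ρ, i % I = ρ := ⟨_, rfl⟩
    obtain ⟨m, hm⟩ : ∃ m, min n1 q = m := ⟨_, rfl⟩
    have hdm : I * q + ρ = i := by rw [← hq, ← hρ]; exact Nat.div_add_mod i I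
    have hρI : ρ < I := hρ ▸ Nat.mod_lt _ hI
    have hmn : m ≤ n1 := hm ▸ min_le_left _ _
    have hmqle : m ≤ q := hm ▸ min_le_right _ _
    have hmq : m * I ≤ I * q := by
      calc m * I ≤ q * I := Nat.mul_le_mul_right I hmqle
        _ = I * q := Nat.mul_comm _ _
    have hq1I : I * (q + 1) = I * q + I := by ring
    have hm1I : I * (m + 1) = I * m + I := by ring
    have hm1I' : (m + 1) * I = I * m + I := by ring
    have hq1I' : (q + 1) * I = I * q + I := by ring
    rw [hq, hm]
    by_cases hins : ρ + 1 = I ∧ m < n1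
    · obtain ⟨hρ1, hlt⟩ := hins
      have hmeq : m = q := by omega
      subst hmeq
      have hqI : m * I = I * m := Nat.mul_comm _ _
      have hi1 : i + 1 = I * (m + 1) := by omega
      have hq1 : (i + 1) / I = m + 1 := by rw [hi1, Nat.mul_div_cancel_left _ hI]
      rw [if_pos ?side]
      case side =>
        constructor
        · rw [PySem.Int.mod_natCast, hρ]; omega
        · simp only [ne_eq, List.replicate_eq_nil_iff]; omega
      · rw [hq1, show min n1 (m + 1) = m + 1 from min_eq_right (by omega)]
        have htail : (List.replicate (n1 - m) v1).tail = List.replicate (n1 - (m + 1)) v1 := by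
          rw [show n1 - m = (n1 - (m + 1)) + 1 by omega, List.replicate_succ, List.tail_cons]
        have hhead : (List.replicate (n1 - m) v1).headD 0 = v1 := by
          rw [show n1 - m = (n1 - (m + 1)) + 1 by omega, List.replicate_succ, List.headD_cons]
        rw [htail, hhead]
        simp only [Prod.mk.injEq, and_true]
        rw [show i - m * I = I - 1 by omega, show i + 1 - (m + 1) * I = 0 by omega]
        rw [List.replicate_succ' (n := m)]
        simp only [List.flatten_append, List.flatten_cons, List.flatten_nil, List.append_nil,
          List.replicate_zero, List.append_assoc]
        congr 1
        rw [← List.append_assoc, ← List.replicate_succ' (n := I - 1), show I - 1 + 1 = I by omega]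
    · rw [if_neg ?nside]
      case nside =>
        rw [PySem.Int.mod_natCast, hρ]
        intro ⟨h1, h2⟩
        simp only [ne_eq, List.replicate_eq_nil_iff] at h2
        exact hins ⟨by omega, by omega⟩
      · have hmin1 : min n1 ((i + 1) / I) = m := by
          by_cases hρ1 : ρ + 1 = I
          · have hn1q : n1 ≤ m := by
              by_contra hcon
              exact hins ⟨hρ1, by omega⟩
            have hv : (i + 1) / I = q + 1 := by
              rw [show i + 1 = I * (q + 1) by omega, Nat.mul_div_cancel_left _ hI]
            rw [hv, min_eq_left (by omega)]
            omega
          · have hv : (i + 1) / I = q := by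
              rw [show i + 1 = I * q + (ρ + 1) by omega, Nat.mul_add_div hI,
                Nat.div_eq_of_lt (by omega)]
              omega
            rw [hv, hm]
        rw [hmin1]
        simp only [Prod.mk.injEq, and_true]
        rw [show i + 1 - m * I = (i - m * I) + 1 by omega,
          List.replicate_succ' (n := i - m * I)]
        simp [List.append_assoc]

lemma pvSpaceNe (n1 n2 : Nat) (h : n1 < n2) (v1 v2 : Int) :
    pvSpaceElements (List.replicate n1 v1) (List.replicate n2 v2) =
      (List.replicate n1 (List.replicate (n2 / (n1 + 1)) v2 ++ [v1])).flatten
        ++ List.replicate (n2 - n1 * (n2 / (n1 + 1))) v2 := by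
  have hI : 0 < n2 / (n1 + 1) := Nat.div_pos (by omega) (by omega)
  unfold pvSpaceElements
  rw [if_neg (by simp; omega)]
  simp only [List.length_replicate]
  rw [pvEnumRepl n2 v2 0, List.foldl_map]
  have hb : (fun (st : List Int × List Int) (j : Nat) =>
        (fun (st : List Int × List Int) (p : Int × Int) =>
          let res := st.1 ++ [p.2]
          if PySem.Int.mod p.1 ((n2 / (n1 + 1) : Nat) : Int) = ((n2 / (n1 + 1) : Nat) : Int) - 1 ∧ st.2 ≠ [] then
            (res ++ [st.2.headD 0], st.2.tail)
          else (res, st.2)) st (((0 : Int) + (j : Int)), v2)) =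
      (fun (st : List Int × List Int) (j : Nat) =>
        if PySem.Int.mod (j : Int) ((n2 / (n1 + 1) : Nat) : Int) = ((n2 / (n1 + 1) : Nat) : Int) - 1 ∧ st.2 ≠ [] then
          (st.1 ++ [v2] ++ [st.2.headD 0], st.2.tail)
        else (st.1 ++ [v2], st.2)) := by
    funext st j
    simp only [zero_add]
  rw [hb, pvSpaceNeLoop (n2 / (n1 + 1)) n1 v1 v2 hI n2]
  have hle : n1 ≤ n2 / (n2 / (n1 + 1)) := by
    have h1 : (n2 / (n1 + 1)) * (n1 + 1) ≤ n2 := Nat.div_mul_le_self n2 (n1 + 1)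
    have h2 : n1 + 1 ≤ n2 / (n2 / (n1 + 1)) := by
      rw [Nat.le_div_iff_mul_le hI]
      calc (n1 + 1) * (n2 / (n1 + 1)) = (n2 / (n1 + 1)) * (n1 + 1) := Nat.mul_comm _ _
        _ ≤ n2 := h1
    omega
  rw [min_eq_left hle]

-- ===== VERDICT (by name: the statement is the Claim_ definition above) =====
lemma pvMain (c : Nat) (hc : 0 < c) (amount : Int) :
    split_into_even_chunks (c : Int) amount = split_into_even_chunks_alt (c : Int) amount := by
  obtain ⟨Q, hQ⟩ : ∃ Q, amount.toNat / c = Q := ⟨_, rfl⟩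
  obtain ⟨R, hR⟩ : ∃ R, amount.toNat % c = R := ⟨_, rfl⟩
  have hRc : R < c := hR ▸ Nat.mod_lt _ hc
  simp only [split_into_even_chunks, split_into_even_chunks_alt]
  rw [if_neg (by omega : ¬ (c : Int) = 0), if_neg (by omega : ¬ (c : Int) = 0)]
  rw [pvOutput_eq c hc amount, pvBins_eq c hc amount, hQ, hR]
  by_cases hR0 : R = 0
  · subst hR0
    have hcanon0 : pvCanon c Q 0 = List.replicate c (Q : Int) := by simp [pvCanon]
    rw [hcanon0]
    have hbase : (List.replicate c (Q : Int)).getD 0 0 = (Q : Int) := by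
      rw [show c = (c - 1) + 1 by omega, List.replicate_succ, List.getD_cons_zero]
    rw [hbase]
    have hset := pvSetEq_all c Q hc
    rw [hcanon0] at hset
    rw [if_pos hset]
    have hlast : PySem.List.pyGetD (List.replicate c (Q : Int)) (-1) 0 = (Q : Int) := by
      rw [PySem.List.pyGetD_neg_one _ _ (by simp; omega), List.getLast_replicate]
    rw [hlast, if_pos rfl]
  · have hbase : (pvCanon c Q R).getD 0 0 = (Q : Int) + 1 := by
      unfold pvCanon
      rw [show R = (R - 1) + 1 by omega, List.replicate_succ, List.cons_append,
        List.getD_cons_zero]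
    rw [hbase]
    rw [if_neg (by simp [pvSetEq_mixed c Q R (by omega) hRc])]
    have hfs : pvFindSplit (pvCanon c Q R) ((Q : Int) + 1) = R := by
      unfold pvCanon
      exact pvFindSplit_app R (c - R) ((Q : Int) + 1) (Q : Int) (by omega) (by omega)
    rw [hfs]
    have htake : List.take R (pvCanon c Q R) = List.replicate R ((Q : Int) + 1) := by
      unfold pvCanon; exact List.take_left' (by simp)
    have hdrop : List.drop R (pvCanon c Q R) = List.replicate (c - R) (Q : Int) := by
      unfold pvCanon; exact List.drop_left' (by simp)
    rw [htake, hdrop]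
    have hlast : PySem.List.pyGetD (pvCanon c Q R) (-1) 0 = (Q : Int) := by
      have hne : pvCanon c Q R ≠ [] := by unfold pvCanon; simp; omega
      rw [PySem.List.pyGetD_neg_one _ _ hne]
      unfold pvCanon
      rw [List.getLast_append]
      rw [dif_neg (by simp; omega), List.getLast_replicate]
    rw [hlast, if_neg (by omega : ¬ ((Q : Int) + 1 = (Q : Int)))]
    have hcount : (pvCanon c Q R).count ((Q : Int) + 1) = R := by
      unfold pvCanon
      rw [List.count_append, List.count_replicate, List.count_replicate,
        if_pos (beq_self_eq_true _), if_neg (by simp)]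
      omega
    rw [hcount, pvCanon_length c Q R (by omega)]
    simp only [List.length_replicate]
    by_cases hgt : R > c - R
    · rw [if_pos hgt, if_pos (by omega : ((R : Nat) : Int) > ((c : Nat) : Int) - ((R : Nat) : Int))]
      dsimp only
      rw [pvSpaceNe (c - R) R (by omega) (Q : Int) ((Q : Int) + 1)]
      rw [show max 1 (R / (c - R + 1)) = R / (c - R + 1) from
        max_eq_right (Nat.div_pos (by omega) (by omega))]
    · by_cases heq : R = c - R
      · rw [if_neg hgt, if_neg (by omega : ¬ (((R : Nat) : Int) > ((c : Nat) : Int) - ((R : Nat) : Int)))]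
        dsimp only
        rw [show c - R = R by omega, pvSpaceEq R ((Q : Int) + 1) (Q : Int)]
        rw [show max 1 (R / (R + 1)) = 1 by rw [Nat.div_eq_of_lt (by omega)]; rfl]
        simp
      · rw [if_neg hgt, if_neg (by omega : ¬ (((R : Nat) : Int) > ((c : Nat) : Int) - ((R : Nat) : Int)))]
        dsimp only
        rw [pvSpaceNe R (c - R) (by omega) ((Q : Int) + 1) (Q : Int)]
        rw [show max 1 ((c - R) / (R + 1)) = (c - R) / (R + 1) from
          max_eq_right (Nat.div_pos (by omega) (by omega))]

-- ===== VERDICT (by name: the statement is the Claim_ definition above) =====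
theorem split_into_even_chunks_spec : Claim_equal_split_into_even_chunks := by
  intro chunks amount _ hpre
  unfold Spec_split_into_even_chunks
  by_cases hz : chunks = 0
  · subst hz
    simp [split_into_even_chunks, split_into_even_chunks_alt]
  · have hc : chunks = ((chunks.toNat : Nat) : Int) := by
      unfold Pre_split_into_even_chunks at hpre; omega
    rw [hc]
    exact pvMain chunks.toNat (by omega) amount
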